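-- pv_equiv track=rewrite | github.com/c1318821837/Event_extraction | shijian.py | identify_nn
-- ===== SOURCE A (Python) =====
-- def find_obj(answer):
-- 	an=answer[0]
-- 	i=0
-- 	for item in an:
-- 		if item[2]=='dobj':
-- 			return i
-- 			break
-- 		i=i+1
--
-- def find_start(answer):
-- 	an=answer[0]
-- 	i=0
-- 	for item in an:
-- 		if item[2]=='root':
-- 			return i
-- 			break
-- 		i=i+1
--
-- def identify_nn(answer):
-- 	an=answer[0]
-- 	i=0
-- 	con=""
-- 	index=find_obj(answer)
-- 	rindex=find_start(answer)
-- 	connect=[]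
-- 	if index != None and rindex != None:
-- 		for item in an:
-- 			if i<index and i>rindex:
-- 				if item[2]=='nn':
-- 					connect.append(item[0])
-- 			i=i+1
-- 		connect.append(an[index][0])
-- 	for item in connect:
-- 		con=con+item
-- 	return con
-- ===== SOURCE B (Python) =====
-- def identify_nn(answer):
--     # Single forward pass with early exit, instead of A's three separate scans.
--     an = answer[0]
--     index = None   # first 'dobj' position
--     rindex = None  # first 'root' position
--     parts = []
--     for i, item in enumerate(an):
--         if index is not None and rindex is not None:
--             break
--         tag = item[2]
--         if index is None and tag == 'dobj':
--             index = i
--         if rindex is None and tag == 'root':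
--             rindex = i
--         if rindex is not None and index is None and tag == 'nn':
--             parts.append(item[0])
--     if index is None or rindex is None:
--         return ''
--     parts.append(an[index][0])
--     return ''.join(parts)
-- ===== Notes on version B (the rewrite author's own statement) =====
-- stated objective: simpler
-- what changed: A scans the sentence three times (one scan for the first 'dobj', one for the first 'root', one to collect 'nn' words between them); B makes a single forward pass that records both first indices and collects the 'nn' words on the way, exiting early once both tags are found.
import Mathlib
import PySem

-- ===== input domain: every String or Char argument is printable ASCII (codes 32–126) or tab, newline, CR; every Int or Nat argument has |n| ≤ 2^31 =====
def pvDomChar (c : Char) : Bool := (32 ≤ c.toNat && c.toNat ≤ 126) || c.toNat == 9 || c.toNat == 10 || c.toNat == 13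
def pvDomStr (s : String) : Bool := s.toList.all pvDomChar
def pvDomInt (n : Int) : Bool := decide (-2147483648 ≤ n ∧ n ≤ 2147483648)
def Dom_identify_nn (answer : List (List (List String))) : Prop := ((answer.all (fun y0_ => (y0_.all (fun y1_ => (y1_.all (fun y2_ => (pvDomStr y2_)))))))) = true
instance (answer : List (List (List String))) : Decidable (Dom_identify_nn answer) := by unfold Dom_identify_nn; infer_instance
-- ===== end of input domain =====

-- B replaces A's three separate scans (find_obj, find_start, collect) by one forward pass with early exit; objective: simpler/alternative, same asymptotic cost.


-- ===== PORT A =====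
-- item[2] / item[0] / an[index] are ported with PySem.List.pyGet?; the .getD defaults are
-- never reached on inputs satisfying Pre_identify_nn (exactly where Python A returns).
def findObjLoop : List (List String) → Int → Option Int
  | [], _ => none
  | item :: rest, i =>
    if (PySem.List.pyGet? item 2).getD "" = "dobj" then some i
    else findObjLoop rest (i + 1)

def find_obj (answer : List (List (List String))) : Option Int :=
  findObjLoop (answer.headD []) 0

def findStartLoop : List (List String) → Int → Option Int
  | [], _ => none
  | item :: rest, i =>
    if (PySem.List.pyGet? item 2).getD "" = "root" then some i
    else findStartLoop rest (i + 1)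

def find_start (answer : List (List (List String))) : Option Int :=
  findStartLoop (answer.headD []) 0

def collectLoop : List (List String) → Int → Int → Int → List String → List String
  | [], _, _, _, acc => acc
  | item :: rest, i, rindex, index, acc =>
    let acc :=
      if i < index ∧ rindex < i then
        if (PySem.List.pyGet? item 2).getD "" = "nn" then
          acc ++ [(PySem.List.pyGet? item 0).getD ""]
        else acc
      else acc
    collectLoop rest (i + 1) rindex index acc

def identify_nn (answer : List (List (List String))) : String :=
  let an := answer.headD []
  let index := find_obj answer
  let rindex := find_start answer
  let connect : List String :=
    match index, rindex with
    | some idx, some ridx =>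
      collectLoop an 0 ridx idx [] ++
        [(PySem.List.pyGet? ((PySem.List.pyGet? an idx).getD []) 0).getD ""]
    | _, _ => []
  connect.foldl (fun con item => con ++ item) ""

-- ===== PORT B =====
-- single pass: record first 'dobj' (index) and first 'root' (rindex), collect 'nn' words
-- while root seen and dobj not yet, break once both are found.
def altLoop : List (List String) → Int → Option Int → Option Int → List String →
    Option Int × Option Int × List String
  | [], _, index, rindex, parts => (index, rindex, parts)
  | item :: rest, i, index, rindex, parts =>
    if index.isSome ∧ rindex.isSome then (index, rindex, parts)
    else
      let tag := (PySem.List.pyGet? item 2).getD ""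
      let index := if index.isNone ∧ tag = "dobj" then some i else index
      let rindex := if rindex.isNone ∧ tag = "root" then some i else rindex
      let parts :=
        if rindex.isSome ∧ index.isNone ∧ tag = "nn" then
          parts ++ [(PySem.List.pyGet? item 0).getD ""]
        else parts
      altLoop rest (i + 1) index rindex parts

def identify_nn_alt (answer : List (List (List String))) : String :=
  let an := answer.headD []
  let st := altLoop an 0 none none []
  if st.1.isNone ∨ st.2.1.isNone then ""
  else
    String.join (st.2.2 ++
      [(PySem.List.pyGet? ((PySem.List.pyGet? an (st.1.getD 0)).getD []) 0).getD ""])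

-- ===== PRECONDITION & SPEC =====
-- Pre_ holds exactly on the inputs where Python A returns normally: answer is nonempty and
-- every token that A's scans actually subscript (those not strictly after both the first
-- 'dobj' and the first 'root') has length ≥ 3 (so item[2], item[0] exist).
def Pre_identify_nn (answer : List (List (List String))) : Prop :=
  answer ≠ [] ∧
  ∀ i < (answer.headD []).length,
    ((∀ j < i, ((answer.headD []).getD j []).getD 2 "" ≠ "dobj") ∨
     (∀ j < i, ((answer.headD []).getD j []).getD 2 "" ≠ "root")) →
    3 ≤ ((answer.headD []).getD i []).length
instance (answer : List (List (List String))) : Decidable (Pre_identify_nn answer) := by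
  unfold Pre_identify_nn; infer_instance

def pvWitness_identify_nn : List (List (List String)) :=
  [[["ate", "x", "root"], ["big", "y", "nn"], ["apple", "z", "dobj"]]]

def Spec_identify_nn (answer : List (List (List String))) (out : String) : Prop := out = identify_nn_alt answer
instance (answer : List (List (List String))) (out : String) : Decidable (Spec_identify_nn answer out) := by unfold Spec_identify_nn; infer_instance

-- ===== CLAIM (what is proved, stated in full; the proofs are below) =====
def Claim_equal_identify_nn : Prop := ∀ (answer : List (List (List String))), Dom_identify_nn answer → Pre_identify_nn answer → Spec_identify_nn answer (identify_nn answer)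

-- ===== LEMMAS AND PROOFS =====

-- 'nn' words strictly after the first 'root' and before the first 'dobj'
def nnUpto : List (List String) → List String
  | [] => []
  | item :: rest =>
    let tag := (PySem.List.pyGet? item 2).getD ""
    if tag = "dobj" then []
    else if tag = "nn" then (PySem.List.pyGet? item 0).getD "" :: nnUpto rest
    else nnUpto rest

def windowNN : List (List String) → List String
  | [] => []
  | item :: rest =>
    let tag := (PySem.List.pyGet? item 2).getD ""
    if tag = "dobj" then []
    else if tag = "root" then nnUpto rest
    else windowNN rest

theorem fo_lb : ∀ (an : List (List String)) (i d : Int),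
    findObjLoop an i = some d → i ≤ d := by
  intro an
  induction an with
  | nil => intro i d h; simp [findObjLoop] at h
  | cons item rest ih =>
    intro i d h
    simp only [findObjLoop] at h
    split at h
    · cases h; exact le_refl _
    · have := ih (i + 1) d h; omega

theorem fs_lb : ∀ (an : List (List String)) (i r : Int),
    findStartLoop an i = some r → i ≤ r := by
  intro an
  induction an with
  | nil => intro i r h; simp [findStartLoop] at h
  | cons item rest ih =>
    intro i r h
    simp only [findStartLoop] at h
    split at h
    · cases h; exact le_refl _
    · have := ih (i + 1) r h; omega

theorem collect_none : ∀ (an : List (List String)) (i rindex index : Int) (acc : List String),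
    index ≤ i → collectLoop an i rindex index acc = acc := by
  intro an
  induction an with
  | nil => intro i r d acc _; rfl
  | cons item rest ih =>
    intro i r d acc h
    simp only [collectLoop]
    rw [if_neg (by omega : ¬ (i < d ∧ r < i))]
    exact ih (i + 1) r d acc (by omega)

theorem collect_after_root : ∀ (an : List (List String)) (i rindex index : Int) (acc : List String),
    rindex < i → findObjLoop an i = some index →
    collectLoop an i rindex index acc = acc ++ nnUpto an := by
  intro an
  induction an with
  | nil => intro i r d acc _ h; simp [findObjLoop] at h
  | cons item rest ih =>
    intro i r d acc hr hfo
    simp only [findObjLoop] at hfo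
    simp only [collectLoop, nnUpto]
    split at hfo
    next htag =>
      cases hfo
      rw [if_neg (by omega : ¬ (i < i ∧ r < i)), if_pos htag]
      simp [collect_none rest (i + 1) r i acc (by omega)]
    next htag =>
      have hd : i + 1 ≤ d := fo_lb rest (i + 1) d hfo
      rw [if_pos (⟨by omega, hr⟩ : i < d ∧ r < i), if_neg htag]
      by_cases hnn : (PySem.List.pyGet? item 2).getD "" = "nn"
      · rw [if_pos hnn, if_pos hnn, ih (i + 1) r d _ (by omega) hfo]
        simp
      · rw [if_neg hnn, if_neg hnn, ih (i + 1) r d _ (by omega) hfo]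

theorem collect_window : ∀ (an : List (List String)) (i rindex index : Int) (acc : List String),
    findObjLoop an i = some index → findStartLoop an i = some rindex →
    collectLoop an i rindex index acc = acc ++ windowNN an := by
  intro an
  induction an with
  | nil => intro i r d acc h _; simp [findObjLoop] at h
  | cons item rest ih =>
    intro i r d acc hfo hfs
    simp only [findObjLoop] at hfo
    simp only [findStartLoop] at hfs
    simp only [collectLoop, windowNN]
    by_cases hdobj : (PySem.List.pyGet? item 2).getD "" = "dobj"
    · rw [if_pos hdobj] at hfo
      cases hfo
      rw [if_pos hdobj]
      have hroot : ¬ (PySem.List.pyGet? item 2).getD "" = "root" := by rw [hdobj]; decide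
      rw [if_neg hroot] at hfs
      have hrlb : i + 1 ≤ r := fs_lb rest (i + 1) r hfs
      rw [if_neg (by omega : ¬ (i < i ∧ r < i))]
      simp [collect_none rest (i + 1) r i acc (by omega)]
    · rw [if_neg hdobj] at hfo
      have hdlb : i + 1 ≤ d := fo_lb rest (i + 1) d hfo
      rw [if_neg hdobj]
      by_cases hroot : (PySem.List.pyGet? item 2).getD "" = "root"
      · rw [if_pos hroot] at hfs
        cases hfs
        rw [if_pos hroot]
        rw [if_neg (by omega : ¬ (i < d ∧ i < i))]
        exact collect_after_root rest (i + 1) i d acc (by omega) hfo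
      · rw [if_neg hroot] at hfs
        have hrlb : i + 1 ≤ r := fs_lb rest (i + 1) r hfs
        rw [if_neg (by omega : ¬ (i < d ∧ r < i)), if_neg hroot]
        exact ih (i + 1) r d acc hfo hfs

theorem altLoop_full : ∀ (an : List (List String)) (i d r : Int) (parts : List String),
    altLoop an i (some d) (some r) parts = (some d, some r, parts) := by
  intro an; cases an <;> intro i d r parts <;> simp [altLoop]

theorem altLoop_root : ∀ (an : List (List String)) (i r : Int) (parts : List String),
    altLoop an i none (some r) parts = (findObjLoop an i, some r, parts ++ nnUpto an) := by
  intro an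
  induction an with
  | nil => intro i r parts; simp [altLoop, findObjLoop, nnUpto]
  | cons item rest ih =>
    intro i r parts
    simp only [altLoop, findObjLoop, nnUpto, Option.isSome_none, Option.isNone_none,
      Option.isSome_some, Option.isNone_some]
    by_cases hdobj : (PySem.List.pyGet? item 2).getD "" = "dobj"
    · simp [hdobj, altLoop_full]
    · by_cases hnn : (PySem.List.pyGet? item 2).getD "" = "nn"
      · simp only [hdobj, hnn]
        simp [ih (i + 1) r (parts ++ [(PySem.List.pyGet? item 0).getD ""])]
      · simp [hdobj, hnn, ih (i + 1) r parts]

theorem altLoop_dobj : ∀ (an : List (List String)) (i d : Int) (parts : List String),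
    altLoop an i (some d) none parts = (some d, findStartLoop an i, parts) := by
  intro an
  induction an with
  | nil => intro i d parts; simp [altLoop, findStartLoop]
  | cons item rest ih =>
    intro i d parts
    simp only [altLoop, findStartLoop, Option.isSome_none, Option.isNone_none,
      Option.isSome_some, Option.isNone_some]
    by_cases hroot : (PySem.List.pyGet? item 2).getD "" = "root"
    · simp [hroot, altLoop_full]
    · simp [hroot, ih (i + 1) d parts]

theorem altLoop_main : ∀ (an : List (List String)) (i : Int) (parts : List String),
    altLoop an i none none parts = (findObjLoop an i, findStartLoop an i, parts ++ windowNN an) := by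
  intro an
  induction an with
  | nil => intro i parts; simp [altLoop, findObjLoop, findStartLoop, windowNN]
  | cons item rest ih =>
    intro i parts
    simp only [altLoop, findObjLoop, findStartLoop, windowNN, Option.isSome_none,
      Option.isNone_none, Option.isSome_some, Option.isNone_some]
    by_cases hdobj : (PySem.List.pyGet? item 2).getD "" = "dobj"
    · have hroot : ¬ (PySem.List.pyGet? item 2).getD "" = "root" := by rw [hdobj]; decide
      simp [hdobj, hroot, altLoop_dobj]
    · by_cases hroot : (PySem.List.pyGet? item 2).getD "" = "root"
      · have hnn : ¬ (PySem.List.pyGet? item 2).getD "" = "nn" := by rw [hroot]; decide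
        simp [hdobj, hroot, hnn, altLoop_root]
      · simp [hdobj, hroot, ih (i + 1) parts]

-- ===== VERDICT (by name: the statement is the Claim_ definition above) =====
theorem identify_nn_spec : Claim_equal_identify_nn := by
  intro answer _ _
  show identify_nn answer = identify_nn_alt answer
  simp only [identify_nn, identify_nn_alt, find_obj, find_start, altLoop_main]
  cases hfo : findObjLoop (answer.headD []) 0 with
  | none => cases hfs : findStartLoop (answer.headD []) 0 <;> simp
  | some d =>
    cases hfs : findStartLoop (answer.headD []) 0 with
    | none => simp
    | some r =>
      dsimp only
      rw [collect_window (answer.headD []) 0 r d [] hfo hfs]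
      simp [String.join, Option.getD_some]
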